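-- pv_equiv track=rewrite | github.com/rmathure/Google | SudokuVerifier.py | is_sudoku_data_valid
-- ===== SOURCE A (Python) =====
-- def is_sudoku_data_valid(dataList):
--     initialSet = set()
--     for i in range(1,10):
--         initialSet.add(i)
--
--     for data in dataList:
--         if data in initialSet:
--             initialSet.remove(data)
--         else:
--             return False
--
--     if len(initialSet) > 0:
--         return False
--
--     return True
-- ===== SOURCE B (Python) =====
-- def is_sudoku_data_valid(dataList):
--     # simpler: a permutation-of-1..9 check by sorting once and comparing
--     return sorted(dataList) == list(range(1, 10))
-- ===== Notes on version B (the rewrite author's own statement) =====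
-- stated objective: simpler
-- what changed: B sorts the list once and compares it to the canonical list [1..9] instead of building a set of 1..9 and removing matches element by element with early returns.
import Mathlib
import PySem

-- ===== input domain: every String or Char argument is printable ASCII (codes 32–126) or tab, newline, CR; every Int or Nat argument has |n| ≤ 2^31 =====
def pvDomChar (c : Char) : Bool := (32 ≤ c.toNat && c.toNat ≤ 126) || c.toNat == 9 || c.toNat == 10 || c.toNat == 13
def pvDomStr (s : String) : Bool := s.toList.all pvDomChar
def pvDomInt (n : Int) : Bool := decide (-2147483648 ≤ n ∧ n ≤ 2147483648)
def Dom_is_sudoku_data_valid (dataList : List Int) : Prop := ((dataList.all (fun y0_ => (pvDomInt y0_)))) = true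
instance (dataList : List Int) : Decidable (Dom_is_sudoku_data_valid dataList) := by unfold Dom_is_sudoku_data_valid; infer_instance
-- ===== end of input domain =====

-- B replaces A's build-a-set-and-remove loop with one sort and a comparison against [1..9] (simpler; not faster).

-- ===== PORT A =====
-- the 'for data in dataList' loop with its early returns and the final len check
def pvLoopA : List Int → PySem.Set Int → Bool
  | [], s => if PySem.Set.len s > 0 then false else true
  | d :: rest, s =>
    if PySem.Set.contains s d then
      -- 'initialSet.remove(data)': remove? never raises here since membership was just checked
      match PySem.Set.remove? s d with
      | some s' => pvLoopA rest s'
      | none => false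
    else false

def is_sudoku_data_valid (dataList : List Int) : Bool :=
  -- initialSet = set(); for i in range(1,10): initialSet.add(i)
  let initialSet : PySem.Set Int := (PySem.List.pyRange 1 10 1).foldl PySem.Set.add PySem.Set.empty
  pvLoopA dataList initialSet

-- ===== PORT B =====
def is_sudoku_data_valid_alt (dataList : List Int) : Bool :=
  PySem.List.sorted dataList (fun x => x) false == PySem.List.pyRange 1 10 1

-- ===== PRECONDITION & SPEC =====
def Spec_is_sudoku_data_valid (dataList : List Int) (out : Bool) : Prop := out = is_sudoku_data_valid_alt dataList
instance (dataList : List Int) (out : Bool) : Decidable (Spec_is_sudoku_data_valid dataList out) := by unfold Spec_is_sudoku_data_valid; infer_instance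

-- ===== CLAIM (what is proved, stated in full; the proofs are below) =====
def Claim_equal_is_sudoku_data_valid : Prop := ∀ (dataList : List Int), Dom_is_sudoku_data_valid dataList → Spec_is_sudoku_data_valid dataList (is_sudoku_data_valid dataList)

-- ===== LEMMAS AND PROOFS =====

-- A's loop accepts exactly the permutations of the (duplicate-free) working set
theorem pvLoopA_true_iff (xs : List Int) (s : PySem.Set Int) (hnd : s.Nodup) :
    pvLoopA xs s = true ↔ xs.Perm s := by
  induction xs generalizing s with
  | nil =>
    simp only [pvLoopA, PySem.Set.len]
    constructor
    · intro h
      rcases s with _ | ⟨a, t⟩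
      · exact List.Perm.refl []
      · simp at h
    · intro h
      have := h.length_eq
      simp at this
      simp [← this]
  | cons d rest ih =>
    simp only [pvLoopA]
    by_cases hmem : d ∈ s
    · rw [if_pos (PySem.Set.contains_iff s d |>.mpr hmem), PySem.Set.remove?_of_mem hmem]
      rw [ih _ (PySem.Set.nodup_discard s d hnd)]
      constructor
      · intro h
        have hperm : PySem.Set.discard s d |>.Perm (s.erase d) := by
          refine (List.perm_ext_iff_of_nodup (PySem.Set.nodup_discard s d hnd)
            (hnd.erase d)).mpr ?_
          intro y
          rw [PySem.Set.mem_discard, hnd.mem_erase_iff]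
          tauto
        exact (List.cons_perm_iff_perm_erase).mpr ⟨hmem, h.trans hperm⟩
      · intro h
        have h' := (List.cons_perm_iff_perm_erase).mp h
        have hperm : (s.erase d).Perm (PySem.Set.discard s d) := by
          refine (List.perm_ext_iff_of_nodup (hnd.erase d)
            (PySem.Set.nodup_discard s d hnd)).mpr ?_
          intro y
          rw [PySem.Set.mem_discard, hnd.mem_erase_iff]
          tauto
        exact h'.2.trans hperm
    · rw [if_neg (by simpa [PySem.Set.contains_iff] using hmem)]
      constructor
      · intro h; simp at h
      · intro h
        exact absurd (h.mem_iff.mp (List.mem_cons_self)) hmem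

-- B accepts exactly the permutations of [1..9]
theorem alt_true_iff (xs : List Int) :
    is_sudoku_data_valid_alt xs = true ↔ xs.Perm (PySem.List.pyRange 1 10 1) := by
  unfold is_sudoku_data_valid_alt
  rw [beq_iff_eq]
  constructor
  · intro h
    exact h ▸ (PySem.List.sorted_perm xs (fun x => x) false).symm
  · intro h
    exact PySem.List.sorted_eq_of_perm_of_pairwise_lt xs _ (fun x => x) h.symm (by decide)

-- ===== VERDICT (by name: the statement is the Claim_ definition above) =====
theorem is_sudoku_data_valid_spec : Claim_equal_is_sudoku_data_valid := by
  intro dataList _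
  unfold Spec_is_sudoku_data_valid is_sudoku_data_valid
  have hset : (PySem.List.pyRange 1 10 1).foldl PySem.Set.add PySem.Set.empty
      = PySem.List.pyRange 1 10 1 := by decide
  rw [hset]
  have hA := pvLoopA_true_iff dataList (PySem.List.pyRange 1 10 1) (by decide)
  have hB := alt_true_iff dataList
  by_cases h : dataList.Perm (PySem.List.pyRange 1 10 1)
  · rw [hA.mpr h, (hB.mpr h)]
  · rw [Bool.eq_iff_iff, hA, hB]
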